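-- pv_equiv track=rewrite | github.com/Pedro-S-Ferreira/ProjectEuler.net-Solved-Problems | Problem 32(S).py | check_pandigital
-- ===== SOURCE A (Python) =====
-- def check_pandigital(mult1, mult2):
-- 	res = mult1 * mult2
-- 	if "0" in str(mult1) or "0" in str(mult2) or "0" in str(res):
-- 		return False
-- 	check = []
-- 	if len(str(mult1)) + len(str(mult2)) + len(str(res)) == 9:
-- 		for number in str(mult1) + str(mult2) + str(res):
-- 			if not number in check:
-- 				check.append(number)
-- 			else:
-- 				return False
-- 	else:
-- 		return False
-- 	return res
-- ===== SOURCE B (Python) =====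
-- def check_pandigital(mult1, mult2):
--     res = mult1 * mult2
--     if sorted(str(mult1) + str(mult2) + str(res)) == list("123456789"):
--         return res
--     return False
-- ===== Notes on version B (the rewrite author's own statement) =====
-- stated objective: simpler
-- what changed: Replaces A's zero-check, length-check and incremental seen-list duplicate scan with one canonical-form test: sort the concatenated string and compare with '123456789', returning the product on success exactly as A does.
import Mathlib
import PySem

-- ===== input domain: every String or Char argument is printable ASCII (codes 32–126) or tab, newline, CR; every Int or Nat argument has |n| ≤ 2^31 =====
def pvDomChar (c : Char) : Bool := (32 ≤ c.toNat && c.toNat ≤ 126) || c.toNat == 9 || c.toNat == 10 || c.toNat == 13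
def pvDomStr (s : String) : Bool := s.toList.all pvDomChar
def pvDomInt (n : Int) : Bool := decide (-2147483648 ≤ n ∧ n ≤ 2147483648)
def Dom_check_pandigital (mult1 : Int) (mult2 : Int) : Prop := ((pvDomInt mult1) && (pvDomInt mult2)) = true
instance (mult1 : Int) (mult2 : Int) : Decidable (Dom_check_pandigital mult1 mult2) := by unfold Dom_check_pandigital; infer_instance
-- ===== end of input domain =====

-- B replaces A's zero/length checks and incremental seen-list duplicate scan by one canonical-form
-- test (sorted concatenation = "123456789"), returning the product on success exactly as A does;
-- Python returns an int or False, ported here as its truthiness (Bool).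

-- ===== PORT A =====
-- the for-loop over the concatenated string with the growing 'check' list;
-- at loop end Python returns the int 'res', ported as its truthiness (res ≠ 0)
def pandigLoop (res : Int) : List Char → List Char → Bool
  | [], _ => decide (res ≠ 0)
  | c :: rest, check => if check.contains c then false else pandigLoop res rest (check ++ [c])

-- strings are handled as their char lists (PySem.Int.toChars = (str(n)).toList; len/in/+ are list ops)
def check_pandigital (mult1 : Int) (mult2 : Int) : Bool :=
  let res := mult1 * mult2
  if PySem.Chars.isIn ['0'] (PySem.Int.toChars mult1) || PySem.Chars.isIn ['0'] (PySem.Int.toChars mult2)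
     || PySem.Chars.isIn ['0'] (PySem.Int.toChars res) then
    false
  else if (PySem.Int.toChars mult1).length + (PySem.Int.toChars mult2).length + (PySem.Int.toChars res).length == 9 then
    pandigLoop res (PySem.Int.toChars mult1 ++ PySem.Int.toChars mult2 ++ PySem.Int.toChars res) []
  else
    false

-- ===== PORT B =====
-- on success Python B returns res (truthiness: res ≠ 0), else False
def check_pandigital_alt (mult1 : Int) (mult2 : Int) : Bool :=
  let res := mult1 * mult2
  if PySem.List.sorted (PySem.Int.toChars mult1 ++ PySem.Int.toChars mult2 ++ PySem.Int.toChars res)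
       (fun c => c) false = "123456789".toList then
    decide (res ≠ 0)
  else
    false

-- ===== PRECONDITION & SPEC =====
def Spec_check_pandigital (mult1 : Int) (mult2 : Int) (out : Bool) : Prop := out = check_pandigital_alt mult1 mult2
instance (mult1 : Int) (mult2 : Int) (out : Bool) : Decidable (Spec_check_pandigital mult1 mult2 out) := by unfold Spec_check_pandigital; infer_instance

-- ===== CLAIM =====
def Claim_equal_check_pandigital : Prop := ∀ (mult1 : Int) (mult2 : Int), Dom_check_pandigital mult1 mult2 → Spec_check_pandigital mult1 mult2 (check_pandigital mult1 mult2)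

-- ===== LEMMAS AND PROOFS =====

lemma digitChar_mem (m : Nat) (h : m < 10) : m.digitChar ∈ "0123456789".toList := by
  interval_cases m <;> decide

lemma mem_toDigitsCore (f : Nat) : ∀ (n : Nat) (l : List Char) (c : Char),
    c ∈ Nat.toDigitsCore 10 f n l → c ∈ l ∨ c ∈ "0123456789".toList := by
  induction f with
  | zero => intro n l c h; exact Or.inl h
  | succ f ih =>
    intro n l c h
    rw [Nat.toDigitsCore] at h
    by_cases hz : n / 10 = 0
    · simp only [hz] at h
      rcases List.mem_cons.1 h with h | h
      · exact Or.inr (h ▸ digitChar_mem _ (Nat.mod_lt _ (by norm_num)))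
      · exact Or.inl h
    · simp only [hz, reduceIte] at h
      rcases ih _ _ _ h with h | h
      · rcases List.mem_cons.1 h with rfl | h
        · exact Or.inr (digitChar_mem _ (Nat.mod_lt _ (by norm_num)))
        · exact Or.inl h
      · exact Or.inr h

lemma mem_toChars_of_nonneg (n : Int) (h : 0 ≤ n) (c : Char) (hc : c ∈ PySem.Int.toChars n) :
    c ∈ "0123456789".toList := by
  rw [PySem.Int.toChars, if_neg (not_lt.2 h)] at hc
  rcases mem_toDigitsCore _ _ _ _ hc with h' | h'
  · exact absurd h' (List.not_mem_nil)
  · exact h'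

lemma neg_mem_toChars (n : Int) (h : n < 0) : '-' ∈ PySem.Int.toChars n := by
  rw [PySem.Int.toChars, if_pos h]; exact List.mem_cons_self ..

lemma toChars_zero : PySem.Int.toChars 0 = ['0'] := by decide

lemma digit_ne_zero (c : Char) (h : c ∈ "0123456789".toList) (h0 : c ≠ '0') :
    c ∈ "123456789".toList := by
  rw [show ("0123456789".toList) = ['0','1','2','3','4','5','6','7','8','9'] from rfl] at h
  simp only [List.mem_cons, List.not_mem_nil, or_false] at h
  rcases h with rfl | rfl | rfl | rfl | rfl | rfl | rfl | rfl | rfl | rfl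
  · exact absurd rfl h0
  all_goals decide

lemma pandigLoop_eq (res : Int) : ∀ (l check : List Char), check.Nodup →
    pandigLoop res l check = if (check ++ l).Nodup then decide (res ≠ 0) else false := by
  intro l
  induction l with
  | nil => intro check h; simp [pandigLoop, h]
  | cons c rest ih =>
    intro check h
    rw [pandigLoop]
    by_cases hc : c ∈ check
    · rw [if_pos (List.contains_iff_mem.2 hc)]
      have : ¬ (check ++ c :: rest).Nodup :=
        fun hn => (List.nodup_append.1 hn).2.2 c hc c (List.mem_cons_self ..) rfl
      rw [if_neg this]
    · rw [if_neg (by simpa [List.contains_iff_mem] using hc)]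
      rw [ih (check ++ [c]) (by
        rw [List.nodup_append]
        exact ⟨h, List.nodup_singleton c,
          fun a ha b hb heq => hc ((heq.trans (List.mem_singleton.1 hb)) ▸ ha)⟩)]
      simp

lemma isIn_zero_false_iff (l : List Char) :
    (PySem.Chars.isIn ['0'] l = false) ↔ '0' ∉ l := by
  rw [PySem.Chars.isIn_eq_false_iff, List.singleton_infix_iff]

-- A returns true (the truthy product) exactly on permutations of "123456789"
lemma a_eq_perm (m1 m2 : Int) :
    check_pandigital m1 m2 =
      decide ((PySem.Int.toChars m1 ++ PySem.Int.toChars m2 ++ PySem.Int.toChars (m1 * m2)).Perm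
        "123456789".toList) := by
  set A := PySem.Int.toChars m1 with hA
  set B := PySem.Int.toChars m2 with hB
  set C := PySem.Int.toChars (m1 * m2) with hC
  unfold check_pandigital
  simp only []
  rw [← hA, ← hB, ← hC]
  split_ifs with h0 hlen
  · -- some '0' present: not a permutation
    symm; simp only [decide_eq_false_iff_not]
    intro hperm
    have h0mem : '0' ∈ A ++ B ++ C := by
      rcases Bool.or_eq_true_iff.1 h0 with h | h
      · rcases Bool.or_eq_true_iff.1 h with h | h
        · exact List.mem_append_left _ (List.mem_append_left _
            ((List.singleton_infix_iff _ _).1 ((PySem.Chars.isIn_iff_infix _ _).1 h)))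
        · exact List.mem_append_left _ (List.mem_append_right _
            ((List.singleton_infix_iff _ _).1 ((PySem.Chars.isIn_iff_infix _ _).1 h)))
      · exact List.mem_append_right _
          ((List.singleton_infix_iff _ _).1 ((PySem.Chars.isIn_iff_infix _ _).1 h))
    exact absurd (hperm.mem_iff.1 h0mem) (by decide)
  · rw [pandigLoop_eq _ _ _ List.nodup_nil, List.nil_append]
    split_ifs with hnod
    · -- no '0', length 9, all distinct ⇒ a permutation of "123456789", and res ≠ 0
      simp only [Bool.or_eq_true, not_or, Bool.not_eq_true] at h0
      obtain ⟨⟨h0a, h0b⟩, h0c⟩ := h0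
      have hz1 : '0' ∉ A := (isIn_zero_false_iff A).1 h0a
      have hz2 : '0' ∉ B := (isIn_zero_false_iff B).1 h0b
      have hz3 : '0' ∉ C := (isIn_zero_false_iff C).1 h0c
      rw [List.nodup_append] at hnod
      obtain ⟨hnAB, hnC, hdisj2⟩ := hnod
      rw [List.nodup_append] at hnAB
      obtain ⟨hnA, hnB, hdisjAB⟩ := hnAB
      have hm1pos : 0 < m1 := by
        rcases lt_trichotomy m1 0 with hlt | rfl | hpos
        · rcases lt_trichotomy m2 0 with hlt2 | rfl | hpos2
          · exact (hdisjAB '-' (neg_mem_toChars _ hlt) '-' (neg_mem_toChars _ hlt2) rfl).elim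
          · exact (hz3 (by rw [hC, mul_zero, toChars_zero]; exact List.mem_cons_self ..)).elim
          · exact (hdisj2 '-' (List.mem_append_left _ (neg_mem_toChars _ hlt)) '-'
              (neg_mem_toChars _ (mul_neg_of_neg_of_pos hlt hpos2)) rfl).elim
        · exact absurd (by rw [hA, toChars_zero]; exact List.mem_cons_self ..) hz1
        · exact hpos
      have hm2pos : 0 < m2 := by
        rcases lt_trichotomy m2 0 with hlt | rfl | hpos
        · exact (hdisj2 '-' (List.mem_append_right _ (neg_mem_toChars _ hlt)) '-'
            (neg_mem_toChars _ (mul_neg_of_pos_of_neg hm1pos hlt)) rfl).elim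
        · exact absurd (by rw [hB, toChars_zero]; exact List.mem_cons_self ..) hz2
        · exact hpos
      have hsub : (A ++ B ++ C) ⊆ "123456789".toList := by
        intro c hc
        have hd : c ∈ "0123456789".toList := by
          rcases List.mem_append.1 hc with h | h
          · rcases List.mem_append.1 h with h | h
            · exact mem_toChars_of_nonneg _ hm1pos.le _ h
            · exact mem_toChars_of_nonneg _ hm2pos.le _ h
          · exact mem_toChars_of_nonneg _ (mul_pos hm1pos hm2pos).le _ h
        refine digit_ne_zero _ hd ?_
        rintro rfl
        rcases List.mem_append.1 hc with h | h
        · rcases List.mem_append.1 h with h | h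
          · exact hz1 h
          · exact hz2 h
        · exact hz3 h
      have hnodAll : (A ++ B ++ C).Nodup := by
        rw [List.nodup_append, List.nodup_append]
        exact ⟨⟨hnA, hnB, hdisjAB⟩, hnC, hdisj2⟩
      have hlen9 : (A ++ B ++ C).length = 9 := by
        have := of_decide_eq_true hlen
        simp only [List.length_append]
        omega
      have hperm : (A ++ B ++ C).Perm "123456789".toList :=
        (List.subperm_of_subset hnodAll hsub).perm_of_length_le (by rw [hlen9]; decide)
      have hne : m1 * m2 ≠ 0 := fun h => hz3 (by
        rw [hC, h, toChars_zero]; exact List.mem_cons_self ..)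
      exact (decide_eq_true hne).trans (decide_eq_true hperm).symm
    · -- a duplicate char: not a permutation (a permutation of a nodup list is nodup)
      symm; simp only [decide_eq_false_iff_not]
      exact fun hperm => hnod (hperm.nodup_iff.2 (by decide))
  · -- wrong total length: not a permutation
    symm; simp only [decide_eq_false_iff_not]
    intro hperm
    have h9 : ("123456789".toList).length = 9 := by decide
    have := hperm.length_eq
    simp only [List.length_append, h9] at this
    exact hlen (by simp only [beq_iff_eq]; omega)

-- B returns true (the truthy product) exactly on permutations too
lemma b_eq_perm (m1 m2 : Int) :
    check_pandigital_alt m1 m2 =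
      decide ((PySem.Int.toChars m1 ++ PySem.Int.toChars m2 ++ PySem.Int.toChars (m1 * m2)).Perm
        "123456789".toList) := by
  set s := PySem.Int.toChars m1 ++ PySem.Int.toChars m2 ++ PySem.Int.toChars (m1 * m2) with hs
  unfold check_pandigital_alt
  simp only []
  rw [← hs]
  split_ifs with hsort
  · have hperm : s.Perm "123456789".toList := hsort ▸ (PySem.List.sorted_perm _ _ _).symm
    have hz : '0' ∉ s := fun h => absurd (hperm.mem_iff.1 h) (by decide)
    have hne : m1 * m2 ≠ 0 := fun h0 => hz (by
      rw [hs, h0, toChars_zero]; exact List.mem_append_right _ (List.mem_cons_self ..))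
    exact (decide_eq_true hne).trans (decide_eq_true hperm).symm
  · symm; simp only [decide_eq_false_iff_not]
    intro hperm
    exact hsort (PySem.List.sorted_eq_of_perm_of_pairwise_lt _ _ _ hperm.symm (by decide))

-- ===== VERDICT =====
theorem check_pandigital_spec : Claim_equal_check_pandigital := by
  intro m1 m2 _
  unfold Spec_check_pandigital
  rw [a_eq_perm, b_eq_perm]
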